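-- pv_equiv track=rewrite | github.com/jqzl2/IDP_M201 | pathfinding/pathfinding.py | goToPoint
-- ===== SOURCE A (Python) =====
-- def goToPoint(robot , goal, path):
--     '''
--     input:
--     robot = [x1, y1, 0/1]
--     goal = [x2, y2, 0/1]
--     path = [[x1], [y1]]
--
--     return:
--     path = [[x path],[y path]]
--     go to point directly by turning 90 degree
--     match y then match x
--     '''
--     # if y value doesn't match, repeat until it matches
--     if robot[1] != goal[1]:
--         #if the robot is going up/down
--         if robot[1] > goal[1]:
--             sign = -1
--         else:
--             sign = 1
--         #first the robot sets its new position
--         robot[1] = goal[1]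
--
--         #the robot will go to the its x value then overshoot its y value by 20
--         #this is done to acount for the change in y due to rotation
--         path[0].append(robot[0])
--         path[1].append(robot[1] + (sign * 20))
--         #the robot then rotates
--         path[0].append(robot[0] + (sign * 10))
--         path[1].append(robot[1])
--         #call the function again
--         return goToPoint(robot , goal , path)
--
--     # if x value doesn't match, repeat until it matches
--     if robot[0] != goal[0]:
--         #set the new x value
--         robot[0] = goal[0]
--         #go to the location
--         path[0].append(robot[0])
--         path[1].append(robot[1])
--         #call the function again
--         return goToPoint(robot , goal , path)
--
--     #ensure that the half is correct
--     robot[2] = goal[2]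
--     #return the entire path so far
--     return path
-- ===== SOURCE B (Python) =====
-- def goToPoint(robot, goal, path):
--     # Flat, non-recursive version: each coordinate is matched at most once,
--     # so the recursion of the original unrolls into two sequential guards.
--     if robot[1] != goal[1]:
--         sign = -1 if robot[1] > goal[1] else 1
--         robot[1] = goal[1]
--         path[0] += [robot[0], robot[0] + sign * 10]
--         path[1] += [robot[1] + sign * 20, robot[1]]
--     if robot[0] != goal[0]:
--         robot[0] = goal[0]
--         path[0].append(robot[0])
--         path[1].append(robot[1])
--     robot[2] = goal[2]
--     return path
-- ===== Notes on version B (the rewrite author's own statement) =====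
-- stated objective: simpler
-- what changed: Replaced the tail recursion (which re-enters the function after each coordinate fix) by a flat straight-line body with two sequential if-blocks, exploiting that each coordinate is fixed at most once.
import Mathlib
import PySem

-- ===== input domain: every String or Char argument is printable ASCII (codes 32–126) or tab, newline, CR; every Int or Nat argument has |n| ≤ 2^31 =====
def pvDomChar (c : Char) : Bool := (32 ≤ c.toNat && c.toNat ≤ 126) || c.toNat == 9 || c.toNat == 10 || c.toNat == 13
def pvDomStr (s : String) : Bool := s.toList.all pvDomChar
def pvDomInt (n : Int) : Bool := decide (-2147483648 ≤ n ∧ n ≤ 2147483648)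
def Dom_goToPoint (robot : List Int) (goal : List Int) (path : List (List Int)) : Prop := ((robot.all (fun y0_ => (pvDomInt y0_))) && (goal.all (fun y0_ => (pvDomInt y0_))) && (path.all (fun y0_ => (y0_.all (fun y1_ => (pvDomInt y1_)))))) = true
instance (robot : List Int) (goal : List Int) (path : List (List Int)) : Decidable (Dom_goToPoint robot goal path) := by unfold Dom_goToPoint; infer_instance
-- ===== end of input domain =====

-- B replaces A's tail recursion by a flat body with two sequential if-blocks (objective:
-- simpler).  Both A and B mutate `robot` (and `path`) in place; the equivalence proved
-- here is about the RETURN value (which is the mutated `path`).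

-- ===== PORT A =====
-- A's recursion re-enters the function at most twice more (each coordinate is fixed at
-- most once), so a fuel of 3 is a totality guard only: it is never exhausted on inputs
-- admitted by Pre_goToPoint.
def goToPointFuel : Nat → List Int → List Int → List (List Int) → List (List Int)
  | 0, _, _, path => path
  | Nat.succ n, robot, goal, path =>
    if PySem.List.pyGetD robot 1 0 ≠ PySem.List.pyGetD goal 1 0 then
      let sign : Int := if PySem.List.pyGetD robot 1 0 > PySem.List.pyGetD goal 1 0 then -1 else 1
      let robot := PySem.List.pySetD robot 1 (PySem.List.pyGetD goal 1 0)
      let path := PySem.List.pySetD path 0 (PySem.List.pyGetD path 0 [] ++ [PySem.List.pyGetD robot 0 0])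
      let path := PySem.List.pySetD path 1 (PySem.List.pyGetD path 1 [] ++ [PySem.List.pyGetD robot 1 0 + sign * 20])
      let path := PySem.List.pySetD path 0 (PySem.List.pyGetD path 0 [] ++ [PySem.List.pyGetD robot 0 0 + sign * 10])
      let path := PySem.List.pySetD path 1 (PySem.List.pyGetD path 1 [] ++ [PySem.List.pyGetD robot 1 0])
      goToPointFuel n robot goal path
    else if PySem.List.pyGetD robot 0 0 ≠ PySem.List.pyGetD goal 0 0 then
      let robot := PySem.List.pySetD robot 0 (PySem.List.pyGetD goal 0 0)
      let path := PySem.List.pySetD path 0 (PySem.List.pyGetD path 0 [] ++ [PySem.List.pyGetD robot 0 0])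
      let path := PySem.List.pySetD path 1 (PySem.List.pyGetD path 1 [] ++ [PySem.List.pyGetD robot 1 0])
      goToPointFuel n robot goal path
    else
      -- robot[2] = goal[2] mutates robot only; the returned value is path
      path

def goToPoint (robot : List Int) (goal : List Int) (path : List (List Int)) : List (List Int) :=
  goToPointFuel 3 robot goal path

-- ===== PORT B =====
def goToPoint_alt (robot : List Int) (goal : List Int) (path : List (List Int)) : List (List Int) :=
  -- first guard: match y
  let st :=
    if PySem.List.pyGetD robot 1 0 ≠ PySem.List.pyGetD goal 1 0 then
      let sign : Int := if PySem.List.pyGetD robot 1 0 > PySem.List.pyGetD goal 1 0 then -1 else 1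
      let robot := PySem.List.pySetD robot 1 (PySem.List.pyGetD goal 1 0)
      let path := PySem.List.pySetD path 0 (PySem.List.pyGetD path 0 [] ++ [PySem.List.pyGetD robot 0 0, PySem.List.pyGetD robot 0 0 + sign * 10])
      let path := PySem.List.pySetD path 1 (PySem.List.pyGetD path 1 [] ++ [PySem.List.pyGetD robot 1 0 + sign * 20, PySem.List.pyGetD robot 1 0])
      (robot, path)
    else (robot, path)
  let robot := st.1
  let path := st.2
  -- second guard: match x
  let path :=
    if PySem.List.pyGetD robot 0 0 ≠ PySem.List.pyGetD goal 0 0 then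
      let robot := PySem.List.pySetD robot 0 (PySem.List.pyGetD goal 0 0)
      let path := PySem.List.pySetD path 0 (PySem.List.pyGetD path 0 [] ++ [PySem.List.pyGetD robot 0 0])
      PySem.List.pySetD path 1 (PySem.List.pyGetD path 1 [] ++ [PySem.List.pyGetD robot 1 0])
    else path
  -- robot[2] = goal[2] mutates robot only
  path

-- ===== PRECONDITION & SPEC =====
-- Pre_ is exactly where the Python A returns: robot and goal need a third element
-- (robot[2] = goal[2] is always executed), and path needs two rows unless both
-- coordinates already match (then path is never touched).
def Pre_goToPoint (robot : List Int) (goal : List Int) (path : List (List Int)) : Prop :=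
  3 ≤ robot.length ∧ 3 ≤ goal.length ∧
  ((robot.getD 1 0 = goal.getD 1 0 ∧ robot.getD 0 0 = goal.getD 0 0) ∨ 2 ≤ path.length)
instance (robot : List Int) (goal : List Int) (path : List (List Int)) : Decidable (Pre_goToPoint robot goal path) := by unfold Pre_goToPoint; infer_instance

def pvWitness_goToPoint : List Int × List Int × List (List Int) := ([0, 0, 0], [3, 4, 1], [[0], [0]])

def Spec_goToPoint (robot : List Int) (goal : List Int) (path : List (List Int)) (out : List (List Int)) : Prop := out = goToPoint_alt robot goal path
instance (robot : List Int) (goal : List Int) (path : List (List Int)) (out : List (List Int)) : Decidable (Spec_goToPoint robot goal path out) := by unfold Spec_goToPoint; infer_instance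

-- ===== CLAIM (what is proved, stated in full; the proofs are below) =====
def Claim_equal_goToPoint : Prop := ∀ (robot : List Int) (goal : List Int) (path : List (List Int)), Dom_goToPoint robot goal path → Pre_goToPoint robot goal path → Spec_goToPoint robot goal path (goToPoint robot goal path)

-- ===== LEMMAS AND PROOFS =====

-- reduction of the PySem index/update primitives at the concrete numeral indices 0 and 1
theorem pvGetD_one {α : Type} (a b : α) (l : List α) (d : α) :
    PySem.List.pyGetD (a :: b :: l) (1 : Int) d = b := by
  have h : (1 : Int) = ((1 : Nat) : Int) := rfl
  rw [h, PySem.List.pyGetD_natCast]; rfl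

theorem pvSetD_zero {α : Type} (a : α) (l : List α) (v : α) :
    PySem.List.pySetD (a :: l) (0 : Int) v = v :: l := by
  have h : (0 : Int) = ((0 : Nat) : Int) := rfl
  rw [h, PySem.List.pySetD_natCast]; rfl

theorem pvSetD_one {α : Type} (a b : α) (l : List α) (v : α) :
    PySem.List.pySetD (a :: b :: l) (1 : Int) v = a :: v :: l := by
  have h : (1 : Int) = ((1 : Nat) : Int) := rfl
  rw [h, PySem.List.pySetD_natCast]; rfl

-- ===== VERDICT (by name: the statement is the Claim_ definition above) =====
theorem goToPoint_spec : Claim_equal_goToPoint := by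
  intro robot goal path _ hpre
  obtain ⟨hr, hg, hp⟩ := hpre
  match robot, goal with
  | r0 :: r1 :: r2 :: rr, g0 :: g1 :: g2 :: gr =>
    rcases hp with ⟨hy, hx⟩ | hp
    · simp only [List.getD, List.getElem?_cons_succ, List.getElem?_cons_zero, Option.getD_some] at hy hx
      subst hy hx
      simp [Spec_goToPoint, goToPoint, goToPointFuel, goToPoint_alt, pvGetD_one]
    · match path with
      | p0 :: p1 :: pr =>
        simp only [Spec_goToPoint, goToPoint, goToPointFuel, goToPoint_alt]
        by_cases h1 : r1 = g1 <;> by_cases h0 : r0 = g0 <;>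
          simp [h1, h0, pvGetD_one, pvSetD_zero, pvSetD_one]
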